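-- pv_equiv track=rewrite | github.com/V1ktor11aa/kolesnikova_homework6 | homework6.2.py | count_grids_with_prime_square_moves
-- ===== SOURCE A (Python) =====
-- def is_prime(n):
--     if n <= 1:
--         return False
--     if n <= 3:
--         return True
--     if n % 2 == 0 or n % 3 == 0:
--         return False
--     i = 5
--     while i * i <= n:
--         if n % i == 0 or n % (i + 2) == 0:
--             return False
--         i += 6
--     return True
--
-- def count_grids_with_prime_square_moves(rows, cols):
--     def is_square_prime(row, col):
--         num = row * col + 1
--         return is_prime(num)
--
--     count = 0
--     for i in range(1, rows + 1):
--         for j in range(1, cols + 1):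
--             if is_square_prime(i, j):
--                 count += 1
--
--     return count
-- ===== SOURCE B (Python) =====
-- def count_grids_with_prime_square_moves(rows, cols):
--     if rows < 1 or cols < 1:
--         return 0
--     limit = rows * cols + 1
--     is_comp = bytearray(limit + 1)
--     d = 2
--     while d * d <= limit:
--         for m in range(d * d, limit + 1, d):
--             is_comp[m] = 1
--         d += 1
--     count = 0
--     for i in range(1, rows + 1):
--         for j in range(1, cols + 1):
--             if not is_comp[i * j + 1]:
--                 count += 1
--     return count
-- ===== Notes on version B (the rewrite author's own statement) =====
-- stated objective: faster
-- what changed: B replaces A's per-cell 6k±1 trial-division primality test with one composite-marking sieve up to rows*cols+1 built once, so each grid cell becomes an O(1) table lookup.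
import Mathlib
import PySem

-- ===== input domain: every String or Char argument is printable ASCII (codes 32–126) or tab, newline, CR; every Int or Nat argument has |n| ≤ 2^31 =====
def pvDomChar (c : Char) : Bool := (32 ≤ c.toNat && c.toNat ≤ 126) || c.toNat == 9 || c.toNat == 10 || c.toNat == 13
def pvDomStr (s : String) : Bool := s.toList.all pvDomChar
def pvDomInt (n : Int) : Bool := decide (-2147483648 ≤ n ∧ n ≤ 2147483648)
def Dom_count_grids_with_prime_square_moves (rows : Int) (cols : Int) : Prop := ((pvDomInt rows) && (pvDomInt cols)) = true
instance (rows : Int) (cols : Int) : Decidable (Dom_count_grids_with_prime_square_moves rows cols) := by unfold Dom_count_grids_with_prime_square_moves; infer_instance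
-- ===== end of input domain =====

-- B builds one composite-marking sieve up to rows*cols+1 instead of running A's
-- per-cell trial-division primality test; objective: faster.

-- ===== PORT A =====

-- the 'while i * i <= n: … i += 6' loop of A's is_prime
def pyIsPrimeLoop (n : Int) (i : Int) : Bool :=
  if i * i ≤ n then
    if n % i == 0 || n % (i + 2) == 0 then false
    else pyIsPrimeLoop n (i + 6)
  else true
termination_by (n + 1 - i).toNat
decreasing_by
  have hin : i ≤ n := by
    by_cases h : i ≤ 0
    · nlinarith [mul_self_nonneg i]
    · nlinarith
  omega

-- A's is_prime (its divisors 2, 3, i, i+2 are positive, so Int.emod agrees with Python's %)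
def is_prime (n : Int) : Bool :=
  if n ≤ 1 then false
  else if n ≤ 3 then true
  else if n % 2 == 0 || n % 3 == 0 then false
  else pyIsPrimeLoop n 5

def count_grids_with_prime_square_moves (rows : Int) (cols : Int) : Int :=
  (PySem.List.pyRange 1 (rows + 1) 1).foldl (fun count i =>
    (PySem.List.pyRange 1 (cols + 1) 1).foldl (fun c j =>
      if is_prime (i * j + 1) then c + 1 else c) count) 0

-- ===== PORT B =====

-- 'for m in range(d*d, limit+1, d): is_comp[m] = 1' (every index written is in bounds)
def markMultiples (arr : Array Bool) (d : Int) (limit : Int) : Array Bool :=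
  (PySem.List.pyRange (d * d) (limit + 1) d).foldl (fun a m => a.set! m.toNat true) arr

-- 'while d*d <= limit: …; d += 1'
def sieveLoop (limit : Int) (d : Int) (arr : Array Bool) : Array Bool :=
  if d * d ≤ limit then sieveLoop limit (d + 1) (markMultiples arr d limit) else arr
termination_by (limit + 1 - d).toNat
decreasing_by
  have hin : d ≤ limit := by
    by_cases h : d ≤ 0
    · nlinarith [mul_self_nonneg d]
    · nlinarith
  omega

def count_grids_with_prime_square_moves_alt (rows : Int) (cols : Int) : Int :=
  if rows < 1 ∨ cols < 1 then 0
  else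
    let limit := rows * cols + 1
    let isComp := sieveLoop limit 2 (Array.replicate (limit + 1).toNat false)
    (PySem.List.pyRange 1 (rows + 1) 1).foldl (fun count i =>
      (PySem.List.pyRange 1 (cols + 1) 1).foldl (fun c j =>
        if isComp.getD (i * j + 1).toNat false then c else c + 1) count) 0

-- ===== PRECONDITION & SPEC =====
def Spec_count_grids_with_prime_square_moves (rows : Int) (cols : Int) (out : Int) : Prop := out = count_grids_with_prime_square_moves_alt rows cols
instance (rows : Int) (cols : Int) (out : Int) : Decidable (Spec_count_grids_with_prime_square_moves rows cols out) := by unfold Spec_count_grids_with_prime_square_moves; infer_instance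

-- ===== CLAIM (what is proved, stated in full; the proofs are below) =====
def Claim_equal_count_grids_with_prime_square_moves : Prop := ∀ (rows : Int) (cols : Int), Dom_count_grids_with_prime_square_moves rows cols → Spec_count_grids_with_prime_square_moves rows cols (count_grids_with_prime_square_moves rows cols)

-- ===== LEMMAS AND PROOFS =====

-- no divisor of the shape the wheel tests (base j ≡ 5 mod 6 at or above i with j² ≤ n)
def NoWheelFac (n : Int) (i : Int) : Prop :=
  ∀ j : Int, i ≤ j → j % 6 = 5 → j * j ≤ n → ¬(n % j = 0 ∨ n % (j + 2) = 0)

theorem pyIsPrimeLoop_iff (n i : Int) (h5 : 5 ≤ i) (h6 : i % 6 = 5) :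
    pyIsPrimeLoop n i = true ↔ NoWheelFac n i := by
  induction i using pyIsPrimeLoop.induct n with
  | case1 i hle htest =>
    rw [pyIsPrimeLoop, if_pos hle, if_pos htest]
    exact ⟨fun h => absurd h (by decide),
      fun hnw => absurd (show n % i = 0 ∨ n % (i+2) = 0 by simpa using htest)
        (hnw i le_rfl h6 hle)⟩
  | case2 i hle htest ih =>
    rw [pyIsPrimeLoop, if_pos hle, if_neg htest]
    rw [ih (by omega) (by omega)]
    constructor
    · intro hnw j hj hj6 hjj
      rcases (show j = i ∨ i + 6 ≤ j by omega) with rfl | hj'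
      · simpa using htest
      · exact hnw j hj' hj6 hjj
    · intro hnw j hj hj6 hjj
      exact hnw j (by omega) hj6 hjj
  | case3 i hle =>
    rw [pyIsPrimeLoop, if_neg hle]
    refine ⟨fun _ j hj hj6 hjj => ?_, fun _ => rfl⟩
    exact absurd (show i * i ≤ n by nlinarith) hle

-- A's is_prime decides primality of n.toNat for n ≥ 2
theorem is_prime_iff (n : Int) (h2 : 2 ≤ n) :
    is_prime n = true ↔ Nat.Prime n.toNat := by
  have hcast : ((n.toNat : Int)) = n := Int.toNat_of_nonneg (by omega)
  unfold is_prime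
  rw [if_neg (by omega)]
  by_cases h3 : n ≤ 3
  · rw [if_pos h3]
    refine ⟨fun _ => ?_, fun _ => rfl⟩
    rcases (show n = 2 ∨ n = 3 by omega) with rfl | rfl <;> decide
  · rw [if_neg h3]
    by_cases h23 : n % 2 = 0 ∨ n % 3 = 0
    · rw [if_pos (by simpa using h23)]
      refine ⟨fun h => absurd h (by decide), fun hp => ?_⟩
      exfalso
      rcases h23 with h | h
      · have hdvd : (2:ℤ) ∣ n := Int.dvd_of_emod_eq_zero h
        have : (2:ℕ) ∣ n.toNat := by rw [← hcast] at hdvd; exact_mod_cast hdvd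
        rcases (hp.eq_one_or_self_of_dvd 2 this) with h' | h' <;> omega
      · have hdvd : (3:ℤ) ∣ n := Int.dvd_of_emod_eq_zero h
        have : (3:ℕ) ∣ n.toNat := by rw [← hcast] at hdvd; exact_mod_cast hdvd
        rcases (hp.eq_one_or_self_of_dvd 3 this) with h' | h' <;> omega
    · rw [if_neg (by simpa using h23)]
      rcases not_or.mp h23 with ⟨hm2, hm3⟩
      rw [pyIsPrimeLoop_iff n 5 (by omega) (by decide)]
      constructor
      · intro hnw
        by_contra hnp
        have hpos : 0 < n.toNat := by omega
        have hp : n.toNat.minFac.Prime := Nat.minFac_prime (by omega)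
        have hpd : n.toNat.minFac ∣ n.toNat := Nat.minFac_dvd _
        have hpp : n.toNat.minFac * n.toNat.minFac ≤ n.toNat := by
          have := Nat.minFac_sq_le_self hpos hnp
          nlinarith [this]
        have hpdZ : ((n.toNat.minFac : ℤ)) ∣ n := by rw [← hcast]; exact_mod_cast hpd
        have hn2 : ¬ ((2:ℕ) ∣ n.toNat.minFac) := by
          intro h
          have : (2:ℤ) ∣ n := by
            rw [← hcast]; exact_mod_cast (dvd_trans h hpd)
          exact hm2 (Int.emod_eq_zero_of_dvd this)
        have hn3 : ¬ ((3:ℕ) ∣ n.toNat.minFac) := by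
          intro h
          have : (3:ℤ) ∣ n := by
            rw [← hcast]; exact_mod_cast (dvd_trans h hpd)
          exact hm3 (Int.emod_eq_zero_of_dvd this)
        have h2le := hp.two_le
        have hp5 : 5 ≤ n.toNat.minFac := by omega
        have hppZ : ((n.toNat.minFac:ℤ)) * ((n.toNat.minFac:ℤ)) ≤ n := by
          rw [← hcast]; exact_mod_cast hpp
        have hmodn : n % ((n.toNat.minFac:ℤ)) = 0 := Int.emod_eq_zero_of_dvd hpdZ
        have h6 : n.toNat.minFac % 6 = 1 ∨ n.toNat.minFac % 6 = 5 := by omega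
        rcases h6 with h6 | h6
        · refine hnw ((n.toNat.minFac:ℤ) - 2) (by omega) (by omega)
            (by nlinarith) (Or.inr (by simpa using hmodn))
        · exact hnw ((n.toNat.minFac:ℤ)) (by omega) (by omega) hppZ (Or.inl hmodn)
      · intro hp j hj hj6 hjj
        rintro (h | h)
        · have hdvd : j ∣ n := Int.dvd_of_emod_eq_zero h
          have hjn : j.toNat ∣ n.toNat := by
            have hj0 : ((j.toNat : Int)) = j := Int.toNat_of_nonneg (by omega)
            rw [← hcast, ← hj0] at hdvd; exact_mod_cast hdvd
          rcases hp.eq_one_or_self_of_dvd _ hjn with h' | h'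
          · omega
          · have hje : j = n := by omega
            rw [hje] at hjj; nlinarith
        · have hdvd : (j + 2) ∣ n := Int.dvd_of_emod_eq_zero h
          have hjn : (j + 2).toNat ∣ n.toNat := by
            have hj0 : (((j+2).toNat : Int)) = j + 2 := Int.toNat_of_nonneg (by omega)
            rw [← hcast, ← hj0] at hdvd; exact_mod_cast hdvd
          rcases hp.eq_one_or_self_of_dvd _ hjn with h' | h'
          · omega
          · have hje : j + 2 = n := by omega
            nlinarith

theorem getD_set_bool (a : Array Bool) (i k : Nat) (h : k < a.size) :
    (a.set! i true).getD k false = if i = k then true else a.getD k false := by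
  by_cases hik : i = k
  · subst hik; simp [Array.set!, Array.getD, h]
  · simp [Array.set!, Array.getD, h, Array.getElem_setIfInBounds_ne, hik]

theorem size_foldl_set (ms : List Int) (arr : Array Bool) :
    (ms.foldl (fun a m => a.set! m.toNat true) arr).size = arr.size := by
  induction ms generalizing arr with
  | nil => rfl
  | cons m ms ih =>
    simp only [List.foldl]
    rw [ih]
    simp [Array.set!]

theorem getD_foldl_set (ms : List Int) (arr : Array Bool) (k : Nat) (hk : k < arr.size) :
    ((ms.foldl (fun a m => a.set! m.toNat true) arr).getD k false) =
      (arr.getD k false || ms.any (fun m => m.toNat == k)) := by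
  induction ms generalizing arr with
  | nil => simp
  | cons m ms ih =>
    simp only [List.foldl, List.any_cons]
    rw [ih _ (by simp [Array.set!]; omega)]
    rw [getD_set_bool _ _ _ hk]
    by_cases hmk : m.toNat = k
    · simp [hmk]
    · rw [if_neg hmk, show (m.toNat == k) = false from beq_eq_false_iff_ne.mpr hmk]
      simp

theorem size_markMultiples (arr : Array Bool) (d limit : Int) :
    (markMultiples arr d limit).size = arr.size := size_foldl_set _ _

theorem getD_sieveLoop (limit d : Int) (arr : Array Bool) (hd : 2 ≤ d) (k : Nat)
    (hk : k < arr.size) :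
    ((sieveLoop limit d arr).getD k false = true) ↔
      (arr.getD k false = true ∨
        ∃ e : Int, d ≤ e ∧ e * e ≤ limit ∧
          ∃ m : Int, m ∈ PySem.List.pyRange (e * e) (limit + 1) e ∧ m.toNat = k) := by
  induction d, arr using sieveLoop.induct limit with
  | case1 d arr h ih =>
    rw [sieveLoop, if_pos h]
    rw [ih (by omega) (by rw [size_markMultiples]; exact hk)]
    unfold markMultiples
    rw [getD_foldl_set _ _ _ hk]
    constructor
    · rintro (hb | he)
      · rcases Bool.or_eq_true_iff.mp hb with hb | hany
        · exact Or.inl hb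
        · rcases List.any_eq_true.mp hany with ⟨m, hm, hmk⟩
          exact Or.inr ⟨d, le_refl d, h, m, hm, by simpa using hmk⟩
      · rcases he with ⟨e, he1, he2, hm⟩
        exact Or.inr ⟨e, by omega, he2, hm⟩
    · rintro (hb | ⟨e, he1, he2, m, hm, hmk⟩)
      · exact Or.inl (Bool.or_eq_true_iff.mpr (Or.inl hb))
      · by_cases hed : e = d
        · subst hed
          exact Or.inl (Bool.or_eq_true_iff.mpr (Or.inr (List.any_eq_true.mpr ⟨m, hm, beq_iff_eq.mpr hmk⟩)))
        · exact Or.inr ⟨e, by omega, he2, m, hm, hmk⟩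
  | case2 d arr h =>
    rw [sieveLoop, if_neg h]
    constructor
    · exact Or.inl
    · rintro (hb | ⟨e, he1, he2, m, hm, hmk⟩)
      · exact hb
      · exfalso; nlinarith

-- the finished sieve cell for n is set exactly when n is composite (2 ≤ n ≤ limit)
theorem sieve_getD_iff (limit n : Int) (h2 : 2 ≤ n) (hn : n ≤ limit) :
    ((sieveLoop limit 2 (Array.replicate (limit + 1).toNat false)).getD n.toNat false = true) ↔
      ¬ Nat.Prime n.toNat := by
  have hcast : ((n.toNat : Int)) = n := Int.toNat_of_nonneg (by omega)
  have hk : n.toNat < (Array.replicate (limit + 1).toNat false).size := by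
    simp; omega
  rw [getD_sieveLoop limit 2 _ le_rfl n.toNat hk]
  have hinit : (Array.replicate (limit + 1).toNat false).getD n.toNat false = false := by
    simp [Array.getD]
  rw [hinit]
  simp only [Bool.false_eq_true, false_or]
  constructor
  · rintro ⟨e, he2, helim, m, hm, hmk⟩
    rw [PySem.List.mem_pyRange_iff_of_pos (by omega)] at hm
    obtain ⟨hm1, hm2, hm3⟩ := hm
    have hm0 : 0 ≤ m := le_trans (mul_self_nonneg e) hm1
    have hmn : m = n := by omega
    subst hmn
    have hed : e ∣ m := by
      have := dvd_add hm3 (dvd_mul_right e e)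
      simpa using this
    intro hp
    have hen : e.toNat ∣ m.toNat := by
      have he0 : ((e.toNat : Int)) = e := Int.toNat_of_nonneg (by omega)
      rw [← hcast, ← he0] at hed; exact_mod_cast hed
    have helt : e < m := by nlinarith
    rcases hp.eq_one_or_self_of_dvd _ hen with h' | h' <;> omega
  · intro hnp
    have hpos : 0 < n.toNat := by omega
    have hp : n.toNat.minFac.Prime := Nat.minFac_prime (by omega)
    have hpd : n.toNat.minFac ∣ n.toNat := Nat.minFac_dvd _
    have hpp : n.toNat.minFac * n.toNat.minFac ≤ n.toNat := by
      have := Nat.minFac_sq_le_self hpos hnp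
      nlinarith [this]
    have hpdZ : ((n.toNat.minFac : ℤ)) ∣ n := by rw [← hcast]; exact_mod_cast hpd
    have h2le := hp.two_le
    have hppZ : ((n.toNat.minFac:ℤ)) * ((n.toNat.minFac:ℤ)) ≤ n := by
      rw [← hcast]; exact_mod_cast hpp
    refine ⟨(n.toNat.minFac:ℤ), by exact_mod_cast h2le, by omega, n, ?_, rfl⟩
    rw [PySem.List.mem_pyRange_iff_of_pos (by exact_mod_cast hp.pos)]
    exact ⟨hppZ, by omega, dvd_sub hpdZ (dvd_mul_right _ _)⟩

theorem foldl_const {α : Type} (l : List α) (c : Int) :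
    l.foldl (fun acc _ => acc) c = c := by
  induction l generalizing c with
  | nil => rfl
  | cons x xs ih => simpa [List.foldl] using ih c

theorem count_grids_with_prime_square_moves_spec' (rows cols : Int) :
    count_grids_with_prime_square_moves rows cols =
      count_grids_with_prime_square_moves_alt rows cols := by
  by_cases hrc : rows < 1 ∨ cols < 1
  · rw [count_grids_with_prime_square_moves_alt, if_pos hrc]
    unfold count_grids_with_prime_square_moves
    rcases hrc with h | h
    · rw [PySem.List.pyRange_one_eq_nil (by omega : rows + 1 ≤ 1)]
      rfl
    · rw [PySem.List.pyRange_one_eq_nil (by omega : cols + 1 ≤ 1)]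
      simpa using foldl_const (PySem.List.pyRange 1 (rows + 1) 1) 0
  · rw [count_grids_with_prime_square_moves_alt, if_neg hrc]
    rcases not_or.mp hrc with ⟨hr, hc⟩
    unfold count_grids_with_prime_square_moves
    refine PySem.List.foldl_congr_mem _ _ _ _ ?_
    intro acc i hi
    rw [PySem.List.mem_pyRange_one] at hi
    refine PySem.List.foldl_congr_mem _ _ _ _ ?_
    intro c j hj
    rw [PySem.List.mem_pyRange_one] at hj
    have h2 : 2 ≤ i * j + 1 := by nlinarith
    have hlim : i * j + 1 ≤ rows * cols + 1 := by
      have := mul_le_mul (show i ≤ rows by omega) (show j ≤ cols by omega)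
        (by omega) (by omega)
      omega
    have hsieve := sieve_getD_iff (rows * cols + 1) (i * j + 1) h2 hlim
    have hprime := is_prime_iff (i * j + 1) h2
    by_cases hp : Nat.Prime (i * j + 1).toNat
    · rw [if_pos (hprime.mpr hp), if_neg (fun hval => (hsieve.mp hval) hp)]
    · rw [if_neg (fun hval => hp (hprime.mp hval)), if_pos (hsieve.mpr hp)]

-- ===== VERDICT (by name: the statement is the Claim_ definition above) =====
theorem count_grids_with_prime_square_moves_spec : Claim_equal_count_grids_with_prime_square_moves := by
  intro rows cols _
  exact count_grids_with_prime_square_moves_spec' rows cols
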